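-- pv_equiv track=rewrite | github.com/Isomiddinov25/series.py | series.py | series38
-- ===== SOURCE A (Python) =====
-- def series38(collections):
--     results = []
--     for collection in collections:
--         if all(x < y for x, y in zip(collection, collection[1:])):
--             results.append(1)
--         elif all(x > y for x, y in zip(collection, collection[1:])):
--             results.append(-1)
--         else:
--             results.append(0)
--     return results
-- ===== SOURCE B (Python) =====
-- def series38(collections):
--     def classify(c):
--         if len(set(c)) != len(c):
--             return 0
--         if c == sorted(c):
--             return 1
--         if c == sorted(c, reverse=True):
--             return -1
--         return 0
--     return [classify(c) for c in collections]
-- ===== Notes on version B (the rewrite author's own statement) =====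
-- stated objective: alternative
-- what changed: Replaces A's adjacent-pair all() scans with a sort-based classifier: a collection is 1 iff it has no duplicates and equals sorted(itself), -1 iff it has no duplicates and equals sorted(itself, reverse=True), else 0.
import Mathlib
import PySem

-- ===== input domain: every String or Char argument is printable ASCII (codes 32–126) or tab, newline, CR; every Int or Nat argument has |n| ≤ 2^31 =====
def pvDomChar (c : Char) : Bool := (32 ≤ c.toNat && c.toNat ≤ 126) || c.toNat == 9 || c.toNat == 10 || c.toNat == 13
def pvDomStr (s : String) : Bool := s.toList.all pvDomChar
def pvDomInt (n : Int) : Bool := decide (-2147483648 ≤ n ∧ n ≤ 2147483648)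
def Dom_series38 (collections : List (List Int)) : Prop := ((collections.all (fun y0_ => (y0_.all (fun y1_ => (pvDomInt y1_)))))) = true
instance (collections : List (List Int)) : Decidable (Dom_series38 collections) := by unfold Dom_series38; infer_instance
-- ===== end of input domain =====

-- B replaces A's adjacent-pair all() scans with a sort-based classifier: duplicate check via set(), then compare the collection with its sorted (and reverse-sorted) version (objective: alternative algorithm, same asymptotics up to the sort).


-- ===== PORT A =====
-- judge one collection exactly as A: first all(x<y), else all(x>y), else 0
def series38_judge (collection : List Int) : Int :=
  if ((collection.zip (collection.drop 1)).all (fun xy => decide (xy.1 < xy.2))) then 1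
  else if ((collection.zip (collection.drop 1)).all (fun xy => decide (xy.1 > xy.2))) then -1
  else 0

def series38_loop (collections : List (List Int)) (results : List Int) : List Int :=
  match collections with
  | [] => results
  | c :: rest => series38_loop rest (results ++ [series38_judge c])

def series38 (collections : List (List Int)) : List Int :=
  series38_loop collections []

-- ===== PORT B =====
-- B: duplicate check via set(), then compare with sorted(c) and sorted(c, reverse=True)
def series38_classify (c : List Int) : Int :=
  if (PySem.Set.ofList c).length ≠ c.length then 0
  else if c = PySem.List.sorted c (fun x => x) false then 1
  else if c = PySem.List.sorted c (fun x => x) true then -1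
  else 0

def series38_alt (collections : List (List Int)) : List Int :=
  collections.map series38_classify

-- ===== PRECONDITION & SPEC =====
def Spec_series38 (collections : List (List Int)) (out : List Int) : Prop := out = series38_alt collections
instance (collections : List (List Int)) (out : List Int) : Decidable (Spec_series38 collections out) := by unfold Spec_series38; infer_instance

-- ===== CLAIM (what is proved, stated in full; the proofs are below) =====
def Claim_equal_series38 : Prop := ∀ (collections : List (List Int)), Dom_series38 collections → Spec_series38 collections (series38 collections)

-- ===== LEMMAS AND PROOFS =====

-- A's generator 'all(r(x,y) for x,y in zip(c, c[1:]))' says exactly: c is an r-chain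
lemma series38_allZip_iff (r : Int → Int → Prop) [DecidableRel r] (c : List Int) :
    ((c.zip (c.drop 1)).all (fun xy => decide (r xy.1 xy.2))) = true ↔ List.IsChain r c := by
  induction c with
  | nil => simp
  | cons x t ih =>
      cases t with
      | nil => simp
      | cons y t' =>
          simp only [List.drop_one, List.tail_cons, List.zip_cons_cons, List.all_cons,
            Bool.and_eq_true, decide_eq_true_eq, List.isChain_cons_cons] at *
          rw [ih]

lemma series38_ofList_sublist (xs : List Int) : List.Sublist (PySem.Set.ofList xs) xs := by
  induction xs with
  | nil => simp [PySem.Set.ofList_nil]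
  | cons x t ih =>
      rw [PySem.Set.ofList_cons]
      refine List.Sublist.cons₂ x ?_
      have h1 : List.Sublist (PySem.Set.discard (PySem.Set.ofList t) x) (PySem.Set.ofList t) := by
        simp only [PySem.Set.discard]; exact List.filter_sublist
      exact h1.trans ih

lemma series38_len_ofList_iff (xs : List Int) :
    (PySem.Set.ofList xs).length = xs.length ↔ xs.Nodup := by
  constructor
  · intro h
    have := (series38_ofList_sublist xs).eq_of_length h
    rw [← this]; exact PySem.Set.nodup_ofList xs
  · intro h; rw [PySem.Set.ofList_eq_self_of_nodup xs h]

-- with no duplicates, 'Pairwise ≤' upgrades to 'Pairwise <' (and dually)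
lemma series38_pw_lt (c : List Int) (hnd : c.Nodup) (hle : c.Pairwise (· ≤ ·)) :
    c.Pairwise (· < ·) :=
  (hle.and hnd).imp (fun h => lt_of_le_of_ne h.1 h.2)

lemma series38_pw_gt (c : List Int) (hnd : c.Nodup) (hge : c.Pairwise (fun a b => b ≤ a)) :
    c.Pairwise (· > ·) :=
  (hge.and hnd).imp (fun h => lt_of_le_of_ne h.1 (Ne.symm h.2))

-- the per-collection judgements coincide
lemma series38_judge_eq (c : List Int) : series38_judge c = series38_classify c := by
  unfold series38_judge series38_classify
  have hlt : ((c.zip (c.drop 1)).all (fun xy => decide (xy.1 < xy.2))) = true ↔ c.Pairwise (· < ·) := by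
    rw [series38_allZip_iff]; exact List.isChain_iff_pairwise
  have hgt : ((c.zip (c.drop 1)).all (fun xy => decide (xy.1 > xy.2))) = true ↔ c.Pairwise (· > ·) := by
    rw [series38_allZip_iff]; exact List.isChain_iff_pairwise
  by_cases hnd : c.Nodup
  · have hL : ¬ (PySem.Set.ofList c).length ≠ c.length := by
      simp [series38_len_ofList_iff, hnd]
    rw [if_neg hL]
    by_cases hasc : c.Pairwise (· < ·)
    · rw [if_pos (hlt.mpr hasc), if_pos]
      exact (PySem.List.sorted_eq_self_of_pairwise c (fun x => x) (hasc.imp le_of_lt)).symm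
    · have hne : c ≠ PySem.List.sorted c (fun x => x) false := by
        intro h
        exact hasc (series38_pw_lt c hnd (by rw [h] at hnd ⊢; exact h ▸ PySem.List.sorted_pairwise c (fun x => x)))
      rw [if_neg (fun h => hasc (hlt.mp h)), if_neg hne]
      by_cases hdesc : c.Pairwise (· > ·)
      · rw [if_pos (hgt.mpr hdesc), if_pos]
        exact (PySem.List.sorted_rev_eq_self_of_pairwise c (fun x => x) (hdesc.imp le_of_lt)).symm
      · have hne2 : c ≠ PySem.List.sorted c (fun x => x) true := by
          intro h
          exact hdesc (series38_pw_gt c hnd (h ▸ PySem.List.sorted_pairwise_rev c (fun x => x)))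
        rw [if_neg (fun h => hdesc (hgt.mp h)), if_neg hne2]
  · have h1 : ¬ ((c.zip (c.drop 1)).all (fun xy => decide (xy.1 < xy.2))) = true := by
      intro h; exact hnd ((hlt.mp h).imp ne_of_lt)
    have h2 : ¬ ((c.zip (c.drop 1)).all (fun xy => decide (xy.1 > xy.2))) = true := by
      intro h; exact hnd ((hgt.mp h).imp (fun h => (ne_of_lt h).symm))
    rw [if_neg h1, if_neg h2, if_pos]
    intro h; exact hnd (series38_len_ofList_iff c |>.mp h)

lemma series38_loop_eq (collections : List (List Int)) (results : List Int) :
    series38_loop collections results = results ++ collections.map series38_judge := by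
  induction collections generalizing results with
  | nil => simp [series38_loop]
  | cons c rest ih => simp [series38_loop, ih]

-- ===== VERDICT (by name: the statement is the Claim_ definition above) =====
theorem series38_spec : Claim_equal_series38 := by
  intro collections _
  unfold Spec_series38 series38 series38_alt
  rw [series38_loop_eq, List.nil_append]
  exact List.map_congr_left (fun c _ => series38_judge_eq c)
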